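-- pv_equiv track=rewrite | github.com/RCJacH/hummingbird-in-hise | Tools/samplemapping/creators/base.py | _iter_factors
-- ===== SOURCE A (Python) =====
-- def _iter_factors(factors, prod=1, sum=0):
--     try:
--         factor = factors.pop(0)
--     except IndexError:
--         return sum
--     else:
--         sum += prod * factor[1]
--         prod *= factor[0]
--         sum = _iter_factors(factors, prod, sum)
--     return sum
-- ===== SOURCE B (Python) =====
-- def _iter_factors(factors, prod=1, sum=0):
--     while factors:
--         factor = factors.pop(0)
--         sum += prod * factor[1]
--         prod *= factor[0]
--     return sum
-- ===== Notes on version B (the rewrite author's own statement) =====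
-- stated objective: simpler
-- what changed: Replaced the try/except-driven recursion with a plain iterative while-loop over the same accumulators (still consuming the list destructively via pop(0)).
import Mathlib
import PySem

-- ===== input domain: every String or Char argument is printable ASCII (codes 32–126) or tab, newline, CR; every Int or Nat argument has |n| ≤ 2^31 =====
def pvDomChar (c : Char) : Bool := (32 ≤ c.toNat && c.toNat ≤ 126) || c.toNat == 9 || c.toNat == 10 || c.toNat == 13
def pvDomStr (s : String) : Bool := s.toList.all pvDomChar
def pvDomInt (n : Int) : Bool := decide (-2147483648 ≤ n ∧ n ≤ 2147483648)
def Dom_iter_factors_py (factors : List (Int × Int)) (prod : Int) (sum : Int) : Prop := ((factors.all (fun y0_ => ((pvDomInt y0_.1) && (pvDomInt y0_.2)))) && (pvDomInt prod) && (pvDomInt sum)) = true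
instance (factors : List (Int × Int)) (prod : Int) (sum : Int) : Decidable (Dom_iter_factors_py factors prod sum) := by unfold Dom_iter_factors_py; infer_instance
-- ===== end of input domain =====

-- B replaces A's try/except recursion by a plain iterative loop over the same accumulators (simpler);
-- both A and B empty `factors` in place in Python — the equivalence proved here is about the return value.

-- ===== PORT A =====
-- A pops the front element (IndexError on empty list → return sum), updates sum then prod, recurses.
def iter_factors_py (factors : List (Int × Int)) (prod : Int) (sum : Int) : Int :=
  -- factors.pop(0) returns the head and leaves the tail; on [] it raises IndexError, caught → return sum
  match factors with
  | [] => sum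
  | factor :: rest =>
      let sum := sum + prod * factor.2
      let prod := prod * factor.1
      iter_factors_py rest prod sum

-- ===== PORT B =====
-- B's while-loop with (prod, sum) state is a left fold over the list.
def iter_factors_py_alt (factors : List (Int × Int)) (prod : Int) (sum : Int) : Int :=
  (factors.foldl (fun (st : Int × Int) factor => (st.1 * factor.1, st.2 + st.1 * factor.2)) (prod, sum)).2

-- ===== PRECONDITION & SPEC =====
def Spec_iter_factors_py (factors : List (Int × Int)) (prod : Int) (sum : Int) (out : Int) : Prop := out = iter_factors_py_alt factors prod sum
instance (factors : List (Int × Int)) (prod : Int) (sum : Int) (out : Int) : Decidable (Spec_iter_factors_py factors prod sum out) := by unfold Spec_iter_factors_py; infer_instance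

-- ===== CLAIM (what is proved, stated in full; the proofs are below) =====
def Claim_equal_iter_factors_py : Prop := ∀ (factors : List (Int × Int)) (prod : Int) (sum : Int), Dom_iter_factors_py factors prod sum → Spec_iter_factors_py factors prod sum (iter_factors_py factors prod sum)

-- ===== LEMMAS AND PROOFS =====
theorem iter_factors_eq (factors : List (Int × Int)) :
    ∀ (prod sum : Int), iter_factors_py factors prod sum = iter_factors_py_alt factors prod sum := by
  induction factors with
  | nil => intro prod sum; simp [iter_factors_py, iter_factors_py_alt]
  | cons f rest ih =>
      intro prod sum
      simp only [iter_factors_py, iter_factors_py_alt, List.foldl]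
      exact ih _ _

-- ===== VERDICT (by name: the statement is the Claim_ definition above) =====
theorem iter_factors_py_spec : Claim_equal_iter_factors_py := by
  intro factors prod sum _
  unfold Spec_iter_factors_py
  exact iter_factors_eq factors prod sum
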